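-- pv_equiv track=rewrite | github.com/clayelmore/Kaprekar-60714 | scripts/verify_lemma_5_2.py | build_even_ladder_rule
-- ===== SOURCE A (Python) =====
-- def build_even_ladder_rule(d):
--     """Returns coefficient vector for even-ladder rule at d (d >= 6, even)."""
--     pi = [4, 1, 2, 3, 5, 0]
--     sigma = [2, 0, 1, 4, 3, 5]
--     cur_d = 6
--     while cur_d < d:
--         pi.extend([cur_d, cur_d + 1])
--         sigma.extend([cur_d + 1, cur_d])
--         cur_d += 2
--     return tuple(10 ** pi[i] - 10 ** sigma[i] for i in range(d))
-- ===== SOURCE B (Python) =====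
-- _BASE = (10**4 - 10**2, 10**1 - 10**0, 10**2 - 10**1,
--          10**3 - 10**4, 10**5 - 10**3, 10**0 - 10**5)
--
--
-- def build_even_ladder_rule(d):
--     """Returns coefficient vector for even-ladder rule at d (d >= 6, even)."""
--     return tuple(
--         _BASE[i] if i < 6 else (-9 * 10**i if i % 2 == 0 else 9 * 10**(i - 1))
--         for i in range(d)
--     )
-- ===== Notes on version B (the rewrite author's own statement) =====
-- stated objective: simpler
-- what changed: B replaces the pi/sigma permutation lists and the extend-while loop by a fixed 6-entry base tuple plus a closed-form parity expression (-9*10**i for even i>=6, 9*10**(i-1) for odd), computing each coefficient directly from its index.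
import Mathlib
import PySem

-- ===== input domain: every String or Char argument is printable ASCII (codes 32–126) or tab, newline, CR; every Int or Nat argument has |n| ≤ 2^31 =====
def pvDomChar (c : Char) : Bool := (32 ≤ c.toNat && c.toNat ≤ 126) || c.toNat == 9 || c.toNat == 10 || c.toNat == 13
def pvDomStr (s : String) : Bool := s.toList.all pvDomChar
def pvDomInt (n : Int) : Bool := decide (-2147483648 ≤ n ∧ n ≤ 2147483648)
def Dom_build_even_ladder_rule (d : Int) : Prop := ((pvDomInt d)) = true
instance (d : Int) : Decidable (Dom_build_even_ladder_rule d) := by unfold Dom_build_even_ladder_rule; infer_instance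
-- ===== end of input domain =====

-- B computes each coefficient directly from its index (fixed 6-entry base prefix + a
-- parity closed form for i >= 6), instead of building A's pi/sigma permutation lists.

-- ===== PORT A =====
-- the while-loop extending pi and sigma by [cur_d, cur_d+1] / [cur_d+1, cur_d]
def pvExtLoop (d cur : Int) (pi sigma : List Int) : List Int × List Int :=
  if cur < d then
    pvExtLoop d (cur + 2) (pi ++ [cur, cur + 1]) (sigma ++ [cur + 1, cur])
  else (pi, sigma)
termination_by (d - cur).toNat
decreasing_by omega

-- 'pi[i]' / 'sigma[i]' never raise for i in range(d) (the lists always have length ≥ d),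
-- and their entries are ≥ 0, so pyGetD/toNat are exact here.
def build_even_ladder_rule (d : Int) : List Int :=
  let ps := pvExtLoop d 6 [4, 1, 2, 3, 5, 0] [2, 0, 1, 4, 3, 5]
  (PySem.List.pyRange 0 d 1).map (fun i =>
    10 ^ (PySem.List.pyGetD ps.1 i 0).toNat - 10 ^ (PySem.List.pyGetD ps.2 i 0).toNat)

-- ===== PORT B =====
def pvBase : List Int :=
  [10 ^ 4 - 10 ^ 2, 10 ^ 1 - 10 ^ 0, 10 ^ 2 - 10 ^ 1,
   10 ^ 3 - 10 ^ 4, 10 ^ 5 - 10 ^ 3, 10 ^ 0 - 10 ^ 5]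

def build_even_ladder_rule_alt (d : Int) : List Int :=
  (PySem.List.pyRange 0 d 1).map (fun i =>
    if i < 6 then PySem.List.pyGetD pvBase i 0
    else if i % 2 = 0 then -9 * 10 ^ i.toNat else 9 * 10 ^ (i - 1).toNat)

-- ===== PRECONDITION & SPEC =====
def Spec_build_even_ladder_rule (d : Int) (out : List Int) : Prop := out = build_even_ladder_rule_alt d
instance (d : Int) (out : List Int) : Decidable (Spec_build_even_ladder_rule d out) := by unfold Spec_build_even_ladder_rule; infer_instance

-- ===== CLAIM (what is proved, stated in full; the proofs are below) =====
def Claim_equal_build_even_ladder_rule : Prop := ∀ (d : Int), Dom_build_even_ladder_rule d → Spec_build_even_ladder_rule d (build_even_ladder_rule d)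

-- ===== LEMMAS AND PROOFS =====

-- the tails appended to pi / sigma by the loop, in closed recursive form
def pvTailP (d cur : Int) : List Int :=
  if cur < d then cur :: (cur + 1) :: pvTailP d (cur + 2) else []
termination_by (d - cur).toNat
decreasing_by omega

def pvTailS (d cur : Int) : List Int :=
  if cur < d then (cur + 1) :: cur :: pvTailS d (cur + 2) else []
termination_by (d - cur).toNat
decreasing_by omega

theorem pvExtLoop_eq (d cur : Int) (pi sigma : List Int) :
    pvExtLoop d cur pi sigma = (pi ++ pvTailP d cur, sigma ++ pvTailS d cur) := by
  fun_induction pvExtLoop d cur pi sigma with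
  | case1 cur pi sigma h ih =>
    rw [ih]
    conv_rhs => rw [pvTailP, pvTailS]
    rw [if_pos h, if_pos h]
    simp
  | case2 cur pi sigma h =>
    rw [pvTailP, pvTailS, if_neg h, if_neg h]
    simp

theorem pvTailP_get (j : Nat) (d cur : Int) (h : cur + j < d) :
    (pvTailP d cur)[j]? = some (cur + j) := by
  induction j using Nat.strong_induction_on generalizing cur with
  | _ j ih =>
    rw [pvTailP, if_pos (by omega)]
    match j with
    | 0 => simp
    | 1 => simp
    | (m + 2) =>
      have := ih m (by omega) (cur + 2) (by omega)
      simpa [this] using by ring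

theorem pvTailS_get (j : Nat) (d cur : Int) (h : cur + j < d) :
    (pvTailS d cur)[j]? = some (if j % 2 = 0 then cur + j + 1 else cur + j - 1) := by
  induction j using Nat.strong_induction_on generalizing cur with
  | _ j ih =>
    rw [pvTailS, if_pos (by omega)]
    match j with
    | 0 => simp
    | 1 => simp
    | (m + 2) =>
      have := ih m (by omega) (cur + 2) (by omega)
      have hmod : (m + 2) % 2 = m % 2 := by omega
      simp only [List.getElem?_cons_succ, this, hmod]
      by_cases hp : m % 2 = 0 <;> simp [hp] <;> ring

-- ===== VERDICT (by name: the statement is the Claim_ definition above) =====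
theorem build_even_ladder_rule_spec : Claim_equal_build_even_ladder_rule := by
  intro d _
  unfold Spec_build_even_ladder_rule build_even_ladder_rule build_even_ladder_rule_alt
  rw [pvExtLoop_eq]
  apply List.map_congr_left
  intro i hi
  rw [PySem.List.mem_pyRange_one] at hi
  obtain ⟨hi0, hid⟩ := hi
  dsimp only
  by_cases h6 : i < 6
  · rw [if_pos h6,
        PySem.List.pyGetD_eq_getElem _ 0 hi0 (by simp; omega),
        PySem.List.pyGetD_eq_getElem _ 0 hi0 (by simp; omega),
        PySem.List.pyGetD_eq_getElem _ 0 hi0 (by simp [pvBase]; omega)]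
    interval_cases i <;> simp [pvBase]
  · rw [if_neg h6]
    have hn6 : 6 ≤ i.toNat := by omega
    have hjP := pvTailP_get (i.toNat - 6) d 6 (by omega)
    have hjS := pvTailS_get (i.toNat - 6) d 6 (by omega)
    obtain ⟨hlP, hgP⟩ := List.getElem?_eq_some_iff.mp hjP
    obtain ⟨hlS, hgS⟩ := List.getElem?_eq_some_iff.mp hjS
    rw [PySem.List.pyGetD_eq_getElem _ 0 hi0 (by simp; omega),
        PySem.List.pyGetD_eq_getElem _ 0 hi0 (by simp; omega)]
    rw [show (([4, 1, 2, 3, 5, 0] : List Int) ++ pvTailP d 6)[i.toNat]'(by simp; omega)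
          = (pvTailP d 6)[i.toNat - 6]'hlP from by
        rw [List.getElem_append_right (by simpa using hn6)]; simp]
    rw [show (([2, 0, 1, 4, 3, 5] : List Int) ++ pvTailS d 6)[i.toNat]'(by simp; omega)
          = (pvTailS d 6)[i.toNat - 6]'hlS from by
        rw [List.getElem_append_right (by simpa using hn6)]; simp]
    rw [hgP, hgS]
    have hcast : (6 : Int) + ((i.toNat - 6 : Nat) : Int) = i := by omega
    by_cases hp : i % 2 = 0
    · have hp2 : (i.toNat - 6) % 2 = 0 := by omega
      rw [if_pos hp2, if_pos hp]
      have h1 : ((6 : Int) + ((i.toNat - 6 : Nat) : Int) + 1).toNat = i.toNat + 1 := by omega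
      have h2 : ((6 : Int) + ((i.toNat - 6 : Nat) : Int)).toNat = i.toNat := by omega
      rw [h1, h2, pow_succ]
      ring
    · have hp2 : ¬ (i.toNat - 6) % 2 = 0 := by omega
      rw [if_neg hp2, if_neg hp]
      obtain ⟨m, hm⟩ : ∃ m, i.toNat = m + 1 := ⟨i.toNat - 1, by omega⟩
      have h1 : ((6 : Int) + ((i.toNat - 6 : Nat) : Int) - 1).toNat = m := by omega
      have h2 : ((6 : Int) + ((i.toNat - 6 : Nat) : Int)).toNat = m + 1 := by omega
      have h3 : (i - 1).toNat = m := by omega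
      rw [h1, h2, h3, pow_succ]
      ring
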